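-- pv_equiv track=rewrite | github.com/CDMY0417/Tool_MATH | function_tools/function_total/7ojr4s.py | divide_base6
-- ===== SOURCE A (Python) =====
-- def divide_base6(number_base6: int) -> str:
--     a10 = int(str(number_base6), 6)
--     result10 = a10 // 2
--     result6 = ''
--     while result10:
--         result6 = str(result10 % 6) + result6
--         result10 //= 6
--     return result6 or '0'
-- ===== SOURCE B (Python) =====
-- def divide_base6(number_base6: int) -> str:
--     # Base-6 long division by 2, one left-to-right pass over the digit string:
--     # no convert-to-decimal / divide / reconvert round trip.
--     rem = 0
--     out = []
--     for ch in str(number_base6):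
--         cur = rem * 6 + (ord(ch) - 48)
--         q = cur // 2
--         rem = cur % 2
--         if out or q != 0:
--             out.append(chr(48 + q))
--     return ''.join(out) if out else '0'
-- ===== Notes on version B (the rewrite author's own statement) =====
-- stated objective: alternative
-- what changed: B divides in base 6 directly: one left-to-right long-division pass over the digit string of str(n) keeping a remainder, instead of A's parse-to-decimal via int(s,6), floor-divide, and digit-by-digit reconversion loop.
import Mathlib
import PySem

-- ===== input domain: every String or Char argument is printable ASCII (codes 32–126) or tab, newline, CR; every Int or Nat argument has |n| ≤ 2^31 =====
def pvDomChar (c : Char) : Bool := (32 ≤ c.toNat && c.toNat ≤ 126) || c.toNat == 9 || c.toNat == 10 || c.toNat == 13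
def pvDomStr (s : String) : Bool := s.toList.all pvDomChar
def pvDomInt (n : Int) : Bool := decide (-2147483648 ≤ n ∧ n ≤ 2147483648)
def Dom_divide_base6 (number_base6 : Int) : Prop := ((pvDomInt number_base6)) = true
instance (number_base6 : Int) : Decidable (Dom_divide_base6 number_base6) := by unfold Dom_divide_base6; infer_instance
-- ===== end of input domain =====

-- B replaces A's convert-to-decimal / floor-divide / reconvert round trip by one
-- left-to-right base-6 long-division pass over the digit string (alternative
-- decomposition, same asymptotic cost).


-- ===== PORT A =====
-- Hand port of int(s, 6) on strings produced by str(n): such strings never contain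
-- whitespace, '+', '_' or a base prefix, so only the '-' sign and per-digit
-- validation (digit ≥ 6 → ValueError, modelled as none) of CPython's int(s, 6) are
-- reachable; exact there.
def pvDigits6Go : List Char → Nat → Option Nat
  | [], acc => some acc
  | c :: r, acc =>
    if '0' ≤ c ∧ c ≤ '5' then pvDigits6Go r (acc * 6 + (c.toNat - 48)) else none

def pvDigits6 (cs : List Char) : Option Nat :=
  if cs.isEmpty then none else pvDigits6Go cs 0

def pvParse6 (cs : List Char) : Option Int :=
  if cs.head? = some '-' then (pvDigits6 cs.tail).map (fun v => -(v : Int))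
  else (pvDigits6 cs).map (fun v => (v : Int))

-- the 'while result10:' loop of A; the 0 < r guard makes it total (for a negative
-- result10 the Python loop never terminates — Pre_ excludes those inputs; for
-- result10 ≥ 0 the guard r ≠ 0 and 0 < r coincide, identical trace)
def pvLoopA (r : Int) (acc : List Char) : List Char :=
  if _h : 0 < r then
    pvLoopA (PySem.Int.floordiv r 6) (PySem.Int.toChars (PySem.Int.mod r 6) ++ acc)
  else acc
termination_by r.toNat
decreasing_by
  rw [PySem.Int.floordiv_eq_ediv_of_pos (by norm_num)]
  have h1 : r / 6 < r := by
    apply Int.ediv_lt_of_lt_mul (by norm_num)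
    nlinarith [_h]
  have h2 : 0 ≤ r / 6 := Int.ediv_nonneg (le_of_lt _h) (by norm_num)
  omega

def divide_base6 (number_base6 : Int) : String :=
  match pvParse6 (PySem.Int.toChars number_base6) with
  | none => ""   -- int(str(n), 6) raises ValueError here; Pre_ excludes these inputs
  | some a10 =>
    let result10 := PySem.Int.floordiv a10 2
    let result6 := pvLoopA result10 []
    if result6.isEmpty then "0" else String.ofList result6

-- ===== PORT B =====
-- the for-loop of Source B over str(n): state (rem, out); chr(48 + q) ported as
-- Char.ofNat (48 + q).toNat — exact whenever 0 ≤ 48 + q < 0x110000, which holds for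
-- every q this loop produces on Pre_ inputs
def pvLoopB : List Char → Int → List Char → List Char
  | [], _, out => out
  | c :: cs, rem, out =>
    let cur := rem * 6 + ((c.toNat : Int) - 48)
    let q := PySem.Int.floordiv cur 2
    let rem' := PySem.Int.mod cur 2
    if ¬ out.isEmpty ∨ q ≠ 0 then pvLoopB cs rem' (out ++ [Char.ofNat (48 + q).toNat])
    else pvLoopB cs rem' out

def divide_base6_alt (number_base6 : Int) : String :=
  let out := pvLoopB (PySem.Int.toChars number_base6) 0 []
  if out.isEmpty then "0" else String.ofList out

-- ===== PRECONDITION & SPEC =====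
-- Pre_ = exactly the inputs on which A returns: n ≥ 0 (A's while loop diverges for
-- negative n) whose decimal digits are all ≤ 5 (int(str(n), 6) raises ValueError on
-- a digit ≥ 6).
def Pre_divide_base6 (number_base6 : Int) : Prop :=
  0 ≤ number_base6 ∧
    (PySem.Int.toChars number_base6).all (fun c => c.toNat ≤ 53) = true
instance (number_base6 : Int) : Decidable (Pre_divide_base6 number_base6) := by
  unfold Pre_divide_base6; infer_instance

def pvWitness_divide_base6 : Int := 15

def Spec_divide_base6 (number_base6 : Int) (out : String) : Prop :=
  out = divide_base6_alt number_base6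
instance (number_base6 : Int) (out : String) : Decidable (Spec_divide_base6 number_base6 out) := by
  unfold Spec_divide_base6; infer_instance

-- ===== CLAIM (what is proved, stated in full; the proofs are below) =====
def Claim_equal_divide_base6 : Prop := ∀ (number_base6 : Int), Dom_divide_base6 number_base6 → Pre_divide_base6 number_base6 → Spec_divide_base6 number_base6 (divide_base6 number_base6)

-- ===== LEMMAS AND PROOFS =====

-- canonical base-6 digit string of a Nat, empty for 0
def pvRep6 : Nat → List Char
  | 0 => []
  | n + 1 => pvRep6 ((n + 1) / 6) ++ [Nat.digitChar ((n + 1) % 6)]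
decreasing_by exact Nat.div_lt_self (Nat.succ_pos n) (by norm_num)

-- value of a digit string read in base 6, starting from accumulator s
def pvNatval (ds : List Char) (s : Nat) : Nat :=
  match ds with
  | [] => s
  | c :: r => pvNatval r (s * 6 + (c.toNat - 48))

theorem pvRep6_pos (n : Nat) (h : 0 < n) :
    pvRep6 n = pvRep6 (n / 6) ++ [Nat.digitChar (n % 6)] := by
  cases n with
  | zero => omega
  | succ k => rw [pvRep6]

theorem pvRep6_eq_nil_iff (n : Nat) : pvRep6 n = [] ↔ n = 0 := by
  constructor
  · intro h
    by_contra hn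
    rw [pvRep6_pos n (by omega)] at h
    simp at h
  · intro h; subst h; rw [pvRep6]

theorem pv_char_le_iff (c : Char) : ('0' ≤ c ∧ c ≤ '5') ↔ (48 ≤ c.toNat ∧ c.toNat ≤ 53) := by
  have h0 : '0'.toNat = 48 := by decide
  have h5 : '5'.toNat = 53 := by decide
  simp only [Char.le_def, UInt32.le_iff_toNat_le, Char.toNat_val, h0, h5]

theorem pv_digit_toNat (c : Char) (h : c.isDigit = true) : 48 ≤ c.toNat ∧ c.toNat ≤ 57 := by
  have h0 : '0'.toNat = 48 := by decide
  have h9 : '9'.toNat = 57 := by decide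
  simp only [Char.isDigit, decide_eq_true_eq, Bool.and_eq_true,
    UInt32.le_iff_toNat_le, Char.toNat_val, h0, h9] at h
  exact h

theorem pvDigits6Go_eq (ds : List Char) :
    ∀ acc, (∀ c ∈ ds, 48 ≤ c.toNat ∧ c.toNat ≤ 53) →
      pvDigits6Go ds acc = some (pvNatval ds acc) := by
  induction ds with
  | nil => intro acc _; rfl
  | cons c r ih =>
    intro acc h
    have hc := h c (by simp)
    rw [pvDigits6Go, if_pos ((pv_char_le_iff c).mpr hc)]
    exact ih _ (fun d hd => h d (by simp [hd]))

theorem pv_digitChar_eq (q : Nat) (hq : q ≤ 9) : Char.ofNat (48 + q) = Nat.digitChar q := by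
  interval_cases q <;> decide

theorem pvLoopA_eq (m : Nat) : ∀ acc, pvLoopA (m : Int) acc = pvRep6 m ++ acc := by
  induction m using Nat.strong_induction_on with
  | _ m ih =>
    intro acc
    by_cases hm : m = 0
    · subst hm
      rw [pvLoopA, dif_neg (by norm_num), pvRep6]
      simp
    · have hpos : (0 : Int) < (m : Int) := by exact_mod_cast Nat.pos_of_ne_zero hm
      rw [pvLoopA, dif_pos hpos]
      have e1 : PySem.Int.floordiv (m : Int) 6 = ((m / 6 : Nat) : Int) := by
        rw [PySem.Int.floordiv_eq_ediv_of_pos (by norm_num)]; omega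
      have e2 : PySem.Int.mod (m : Int) 6 = ((m % 6 : Nat) : Int) := by
        rw [PySem.Int.mod_eq_emod_of_pos (by norm_num)]; omega
      have e3 : PySem.Int.toChars ((m % 6 : Nat) : Int) = [Nat.digitChar (m % 6)] := by
        rw [PySem.Int.toChars]
        rw [if_neg (by omega)]
        rw [Int.toNat_natCast]
        exact Nat.toDigits_of_lt_base (by omega)
      rw [e1, e2, e3, ih (m / 6) (Nat.div_lt_self (Nat.pos_of_ne_zero hm) (by norm_num))]
      rw [pvRep6_pos m (Nat.pos_of_ne_zero hm)]
      simp

theorem pvNatval_nil (s : Nat) : pvNatval [] s = s := rfl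

theorem pvNatval_cons (s : Nat) (c : Char) (r : List Char) :
    pvNatval (c :: r) s = pvNatval r (s * 6 + (c.toNat - 48)) := rfl

theorem pvLoopB_eq (ds : List Char) :
    ∀ (rem : Int) (m : Nat), (∀ c ∈ ds, 48 ≤ c.toNat ∧ c.toNat ≤ 53) →
      (rem = 0 ∨ rem = 1) →
      pvLoopB ds rem (pvRep6 m) = pvRep6 (pvNatval ds (2 * m + rem.toNat) / 2) := by
  induction ds with
  | nil =>
    intro rem m _ hrem
    show pvRep6 m = pvRep6 (pvNatval [] (2 * m + rem.toNat) / 2)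
    rw [pvNatval_nil]
    congr 1
    rcases hrem with rfl | rfl
    · simp
    · simp
      omega
  | cons c cs ih =>
    intro rem m h hrem
    have hc := h c (by simp)
    have hcs : ∀ d ∈ cs, 48 ≤ d.toNat ∧ d.toNat ≤ 53 := fun d hd => h d (by simp [hd])
    -- the processed two-digit chunk and its halves
    have hcur : rem * 6 + ((c.toNat : Int) - 48) =
        ((rem.toNat * 6 + (c.toNat - 48) : Nat) : Int) := by
      rcases hrem with rfl | rfl <;> push_cast <;> omega
    set nn : Nat := rem.toNat * 6 + (c.toNat - 48) with hnn
    have hnn11 : nn ≤ 11 := by rcases hrem with rfl | rfl <;> simp [hnn] <;> omega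
    have eq_q : PySem.Int.floordiv (rem * 6 + ((c.toNat : Int) - 48)) 2 = ((nn / 2 : Nat) : Int) := by
      rw [hcur, PySem.Int.floordiv_eq_ediv_of_pos (by norm_num)]; omega
    have eq_r : PySem.Int.mod (rem * 6 + ((c.toNat : Int) - 48)) 2 = ((nn % 2 : Nat) : Int) := by
      rw [hcur, PySem.Int.mod_eq_emod_of_pos (by norm_num)]; omega
    have eq_c : Char.ofNat (48 + ((nn / 2 : Nat) : Int)).toNat = Nat.digitChar (nn / 2) := by
      have : (48 + ((nn / 2 : Nat) : Int)).toNat = 48 + nn / 2 := by omega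
      rw [this]; exact pv_digitChar_eq _ (by omega)
    have hrem' : ((nn % 2 : Nat) : Int) = 0 ∨ ((nn % 2 : Nat) : Int) = 1 := by omega
    simp only [pvLoopB, eq_q, eq_r, eq_c]
    by_cases hz : m = 0 ∧ nn / 2 = 0
    · rw [if_neg]
      · have h0 : pvRep6 m = pvRep6 0 := by rw [hz.1]
        rw [h0, ih _ 0 hcs hrem']
        rw [pvNatval_cons]
        have hacc : 2 * 0 + ((nn % 2 : Nat) : Int).toNat
            = (2 * m + rem.toNat) * 6 + (c.toNat - 48) := by omega
        rw [hacc]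
      · have h0 : pvRep6 m = [] := by rw [hz.1, pvRep6]
        simp [h0, hz.2]
    · rw [if_pos]
      · have hout : pvRep6 m ++ [Nat.digitChar (nn / 2)] = pvRep6 (6 * m + nn / 2) := by
          have e6 : (6 * m + nn / 2) / 6 = m := by omega
          have e7 : (6 * m + nn / 2) % 6 = nn / 2 := by omega
          rw [pvRep6_pos (6 * m + nn / 2) (by omega), e6, e7]
        rw [hout, ih _ (6 * m + nn / 2) hcs hrem']
        rw [pvNatval_cons]
        have hacc : 2 * (6 * m + nn / 2) + ((nn % 2 : Nat) : Int).toNat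
            = (2 * m + rem.toNat) * 6 + (c.toNat - 48) := by omega
        rw [hacc]
      · by_cases hm : m = 0
        · right
          have hq : nn / 2 ≠ 0 := by tauto
          exact_mod_cast hq
        · left
          have hne : pvRep6 m ≠ [] := fun hh => hm ((pvRep6_eq_nil_iff m).mp hh)
          simpa [List.isEmpty_iff] using hne

-- ===== VERDICT (by name: the statement is the Claim_ definition above) =====
theorem divide_base6_spec : Claim_equal_divide_base6 := by
  intro n _ hpre
  unfold Spec_divide_base6
  obtain ⟨hn, hall⟩ := hpre
  -- the shared digit string of str(n)
  have hcs : PySem.Int.toChars n = Nat.toDigits 10 n.toNat := by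
    rw [PySem.Int.toChars, if_neg (by omega)]
  set cs : List Char := PySem.Int.toChars n with hcsdef
  have hdig : ∀ c ∈ cs, 48 ≤ c.toNat ∧ c.toNat ≤ 53 := by
    intro c hcmem
    have h1 := pv_digit_toNat c (Nat.isDigit_of_mem_toDigits (b := 10) (by norm_num)
      (by norm_num) (hcs ▸ hcmem))
    have h2 : c.toNat ≤ 53 := by
      rw [List.all_eq_true] at hall
      simpa using hall c hcmem
    exact ⟨h1.1, h2⟩
  have hne : cs ≠ [] := by
    rw [hcs]
    intro hfalse
    have := @Nat.length_toDigits_pos 10 n.toNat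
    rw [hfalse] at this
    simp at this
  -- A's parse succeeds with the base-6 value V of the digits
  have hhead : cs.head? ≠ some '-' := by
    rcases cs with _ | ⟨c, r⟩
    · simp
    · have := hdig c (by simp)
      simp only [List.head?_cons, ne_eq, Option.some.injEq]
      intro hEq
      rw [hEq] at this
      revert this
      decide
  have hparse : pvParse6 cs = some ((pvNatval cs 0 : Nat) : Int) := by
    rw [pvParse6, if_neg hhead, pvDigits6, if_neg (by simpa [List.isEmpty_iff] using hne)]
    rw [pvDigits6Go_eq cs 0 hdig]
    rfl
  set V : Nat := pvNatval cs 0 with hV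
  have hdiv : PySem.Int.floordiv ((V : Nat) : Int) 2 = ((V / 2 : Nat) : Int) := by
    rw [PySem.Int.floordiv_eq_ediv_of_pos (by norm_num)]; omega
  -- A's value
  rw [divide_base6, ← hcsdef, hparse]
  simp only [hdiv, pvLoopA_eq (V / 2) [], List.append_nil]
  -- B's value
  rw [divide_base6_alt, ← hcsdef]
  have hB : pvLoopB cs 0 [] = pvRep6 (V / 2) := by
    have h0 : ([] : List Char) = pvRep6 0 := by rw [pvRep6]
    rw [h0, pvLoopB_eq cs 0 0 hdig (Or.inl rfl)]
    simp [hV]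
  rw [hB]
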